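-- pv_equiv track=rewrite | github.com/rahul14rx/sih_winner_loan | backend/normalize.py | _gen_conversions
-- ===== SOURCE A (Python) =====
-- from typing import Dict, List, Optional, Tuple
--
-- DIGIT_FROM_LETTER: Dict[str, List[str]] = {
--     "O": ["0"], "D": ["0"],
--     "I": ["1"], "L": ["1"],
--     "Z": ["2"],
--     "S": ["5", "3"],
--     "B": ["8"],
--     "G": ["6"],
--     "E": ["3"],
-- }
--
-- LETTER_FROM_DIGIT: Dict[str, List[str]] = {
--     "0": ["O", "D"],
--     "1": ["I", "L"],
--     "2": ["Z"],
--     "3": ["B", "E"],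
--     "5": ["S"],
--     "6": ["G"],
--     "8": ["B"],
-- }
--
-- def _gen_conversions(raw: str, kind: str) -> List[Tuple[str, int]]:
--     # kind: "digit" or "letter"
--     acc = [("", 0)]
--     for ch in raw:
--         nxt: List[Tuple[str, int]] = []
--         for pref, cost in acc:
--             if kind == "digit":
--                 if ch.isdigit():
--                     nxt.append((pref + ch, cost))
--                 elif ch.isalpha() and ch in DIGIT_FROM_LETTER:
--                     for d in DIGIT_FROM_LETTER[ch]:
--                         nxt.append((pref + d, cost + 1))
--             else:
--                 if ch.isalpha():
--                     nxt.append((pref + ch, cost))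
--                 elif ch.isdigit() and ch in LETTER_FROM_DIGIT:
--                     for c in LETTER_FROM_DIGIT[ch]:
--                         nxt.append((pref + c, cost + 1))
--
--         acc = nxt
--         if not acc:
--             return []
--
--     dedup: Dict[str, int] = {}
--     for s, c in acc:
--         if s not in dedup or c < dedup[s]:
--             dedup[s] = c
--     return [(s, dedup[s]) for s in dedup]
-- ===== SOURCE B (Python) =====
-- from typing import Dict, List, Optional, Tuple
--
-- DIGIT_FROM_LETTER: Dict[str, List[str]] = {
--     "O": ["0"], "D": ["0"],
--     "I": ["1"], "L": ["1"],
--     "Z": ["2"],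
--     "S": ["5", "3"],
--     "B": ["8"],
--     "G": ["6"],
--     "E": ["3"],
-- }
--
-- LETTER_FROM_DIGIT: Dict[str, List[str]] = {
--     "0": ["O", "D"],
--     "1": ["I", "L"],
--     "2": ["Z"],
--     "3": ["B", "E"],
--     "5": ["S"],
--     "6": ["G"],
--     "8": ["B"],
-- }
--
--
-- def _column(ch: str, kind: str) -> Optional[Tuple[List[str], int]]:
--     """Replacement characters for one position and that position's cost (0 or 1)."""
--     if kind == "digit":
--         if ch.isdigit():
--             return [ch], 0
--         if ch.isalpha() and ch in DIGIT_FROM_LETTER: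
--             return DIGIT_FROM_LETTER[ch], 1
--         return None
--     if ch.isalpha():
--         return [ch], 0
--     if ch.isdigit() and ch in LETTER_FROM_DIGIT:
--         return LETTER_FROM_DIGIT[ch], 1
--     return None
--
--
-- def _gen_conversions(raw: str, kind: str) -> List[Tuple[str, int]]:
--     # Every variant substitutes exactly the cross-type positions, each at cost 1,
--     # so ALL variants share one total cost, computed once up front; and each
--     # position's replacement set is duplicate-free, so the character product has
--     # no duplicate strings and no dedup / per-path cost tracking is needed.
--     cols: List[List[str]] = []
--     cost = 0
--     for ch in raw:
--         col = _column(ch, kind)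
--         if col is None:
--             return []
--         cols.append(col[0])
--         cost += col[1]
--     strings = [""]
--     for col in reversed(cols):
--         strings = [c + s for c in col for s in strings]
--     return [(s, cost) for s in strings]
-- ===== Notes on version B (the rewrite author's own statement) =====
-- stated objective: simpler
-- what changed: B exploits two invariants A never uses: every variant substitutes exactly the cross-type positions so all variants share one total cost (computed once up front), and each position's replacement set is duplicate-free so the character product has no duplicate strings; hence B enumerates a plain product of characters and drops A's per-path cost accumulation and the min-cost dedup dict entirely.
import Mathlib
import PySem

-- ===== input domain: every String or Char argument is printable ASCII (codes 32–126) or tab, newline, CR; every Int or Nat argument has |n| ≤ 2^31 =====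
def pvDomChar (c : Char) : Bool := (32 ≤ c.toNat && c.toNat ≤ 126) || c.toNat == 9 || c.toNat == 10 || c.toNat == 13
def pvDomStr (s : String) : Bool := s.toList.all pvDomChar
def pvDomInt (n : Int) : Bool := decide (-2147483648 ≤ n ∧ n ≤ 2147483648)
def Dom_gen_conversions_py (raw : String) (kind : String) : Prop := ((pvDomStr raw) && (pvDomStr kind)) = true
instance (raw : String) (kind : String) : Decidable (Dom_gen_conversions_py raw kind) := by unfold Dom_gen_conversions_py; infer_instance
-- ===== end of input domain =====

-- B computes the (single, position-determined) total cost once and enumerates a plain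
-- character product with no dedup dict and no per-path cost tracking; same results as A.


-- Module constants (shared by both Python files): single-char keys/values as Char
def pvDFL : PySem.Dict Char (List Char) := PySem.Dict.ofList
  [('O',['0']),('D',['0']),('I',['1']),('L',['1']),('Z',['2']),('S',['5','3']),('B',['8']),('G',['6']),('E',['3'])]
def pvLFD : PySem.Dict Char (List Char) := PySem.Dict.ofList
  [('0',['O','D']),('1',['I','L']),('2',['Z']),('3',['B','E']),('5',['S']),('6',['G']),('8',['B'])]

-- ===== PORT A =====
-- A's inner double loop: build nxt by appending the extensions of each (pref, cost) in acc
def genA_next (kind : String) (ch : Char) (acc : List (List Char × Int)) : List (List Char × Int) :=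
  acc.foldl (fun nxt pc =>
    if kind == "digit" then
      if PySem.Chars.isdigit ch then nxt ++ [(pc.1 ++ [ch], pc.2)]
      else if PySem.Chars.isalpha ch && pvDFL.contains ch then
        nxt ++ (pvDFL.getD ch []).map (fun d => (pc.1 ++ [d], pc.2 + 1))
      else nxt
    else
      if PySem.Chars.isalpha ch then nxt ++ [(pc.1 ++ [ch], pc.2)]
      else if PySem.Chars.isdigit ch && pvLFD.contains ch then
        nxt ++ (pvLFD.getD ch []).map (fun c => (pc.1 ++ [c], pc.2 + 1))
      else nxt) []

-- A's outer loop with the early 'return []' when acc becomes empty (none = early return)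
def genA_loop (kind : String) : List Char → List (List Char × Int) → Option (List (List Char × Int))
  | [], acc => some acc
  | ch :: rest, acc =>
    let nxt := genA_next kind ch acc
    if nxt.isEmpty then none else genA_loop kind rest nxt

-- A's dedup loop: keep minimum cost per string, first-seen insertion order
def pvDedup (l : List (List Char × Int)) : PySem.Dict (List Char) Int :=
  l.foldl (fun d sc => if !d.contains sc.1 || sc.2 < d.getD sc.1 0 then d.insert sc.1 sc.2 else d)
    PySem.Dict.empty

def gen_conversions_py (raw : String) (kind : String) : List (String × Int) :=
  match genA_loop kind raw.toList [([], 0)] with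
  | none => []
  | some acc =>
    let d := pvDedup acc
    d.keys.map (fun s => (String.ofList s, d.getD s 0))

-- ===== PORT B =====
-- Source B's _column: the replacement characters for one position and that position's cost
def pvColumn (ch : Char) (kind : String) : Option (List Char × Int) :=
  if kind == "digit" then
    if PySem.Chars.isdigit ch then some ([ch], 0)
    else if PySem.Chars.isalpha ch && pvDFL.contains ch then some (pvDFL.getD ch [], 1)
    else none
  else if PySem.Chars.isalpha ch then some ([ch], 0)
  else if PySem.Chars.isdigit ch && pvLFD.contains ch then some (pvLFD.getD ch [], 1)
  else none

-- Source B's first loop: collect the columns and sum the one total cost; none = early 'return []'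
def pvScan (kind : String) : List Char → Option (List (List Char) × Int)
  | [] => some ([], 0)
  | ch :: rest =>
    match pvColumn ch kind with
    | none => none
    | some cd => (pvScan kind rest).map (fun cc => (cd.1 :: cc.1, cd.2 + cc.2))

-- Source B's second loop: strings = [c + s for c in col for s in strings] over reversed(cols)
def pvProduct (cols : List (List Char)) : List (List Char) :=
  cols.reverse.foldl (fun strs col => col.flatMap (fun c => strs.map (c :: ·))) [[]]

def gen_conversions_py_alt (raw : String) (kind : String) : List (String × Int) :=
  match pvScan kind raw.toList with
  | none => []
  | some cc => (pvProduct cc.1).map (fun s => (String.ofList s, cc.2))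

-- ===== PRECONDITION & SPEC =====
def Spec_gen_conversions_py (raw : String) (kind : String) (out : List (String × Int)) : Prop := out = gen_conversions_py_alt raw kind
instance (raw : String) (kind : String) (out : List (String × Int)) : Decidable (Spec_gen_conversions_py raw kind out) := by unfold Spec_gen_conversions_py; infer_instance

-- ===== CLAIM (what is proved, stated in full; the proofs are below) =====
def Claim_equal_gen_conversions_py : Prop := ∀ (raw : String) (kind : String), Dom_gen_conversions_py raw kind → Spec_gen_conversions_py raw kind (gen_conversions_py raw kind)

-- ===== LEMMAS AND PROOFS =====

-- proof-side view of one position of A: its list of (replacement char, cost delta) pairs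
def pvOptPairs (ch : Char) (kind : String) : List (Char × Int) :=
  match pvColumn ch kind with
  | none => []
  | some cd => cd.1.map (fun c => (c, cd.2))

-- proof-side view of A's accumulation: collect the pair-columns, none on an empty one
def pvCollect (kind : String) : List Char → Option (List (List (Char × Int)))
  | [] => some []
  | ch :: rest =>
    let opt := pvOptPairs ch kind
    if opt.isEmpty then none else (pvCollect kind rest).map (opt :: ·)

-- proof-side enumeration of all (string, cost) combinations from pair-columns
def pvCombos : List (List (Char × Int)) → List (List Char × Int)
  | [] => [([], 0)]
  | opt :: rest =>
    let tails := pvCombos rest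
    opt.flatMap (fun cd => tails.map (fun sc => (cd.1 :: sc.1, cd.2 + sc.2)))

-- foldr form of B's product loop
def pvProdR : List (List Char) → List (List Char)
  | [] => [[]]
  | col :: cols => col.flatMap (fun c => (pvProdR cols).map (c :: ·))

theorem pvProduct_eq_prodR (cols : List (List Char)) : pvProduct cols = pvProdR cols := by
  unfold pvProduct
  rw [List.foldl_reverse]
  induction cols with
  | nil => rfl
  | cons col cols ih => simp [pvProdR, ← ih]

-- any column B produces is nonempty and duplicate-free (the tables' value lists are)
theorem pvColumn_props (ch : Char) (kind : String) (cd : List Char × Int)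
    (h : pvColumn ch kind = some cd) : cd.1 ≠ [] ∧ cd.1.Nodup := by
  unfold pvColumn at h
  split_ifs at h with h1 h2 h3 h4 h5
  · cases h; exact ⟨by simp, by simp⟩
  · have hk : ch ∈ pvDFL.keys := by
      rw [← PySem.Dict.contains_iff_mem_keys]
      exact (Bool.and_eq_true_iff.mp h3).2
    have hkeys : pvDFL.keys = ['O','D','I','L','Z','S','B','G','E'] := by decide
    rw [hkeys] at hk
    cases h
    fin_cases hk <;> exact ⟨by decide, by decide⟩
  · cases h; exact ⟨by simp, by simp⟩
  · have hk : ch ∈ pvLFD.keys := by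
      rw [← PySem.Dict.contains_iff_mem_keys]
      exact (Bool.and_eq_true_iff.mp h5).2
    have hkeys : pvLFD.keys = ['0','1','2','3','5','6','8'] := by decide
    rw [hkeys] at hk
    cases h
    fin_cases hk <;> exact ⟨by decide, by decide⟩

-- A's inner double loop is the flatMap of per-position pair-options over acc
theorem genA_next_eq (kind : String) (ch : Char) (acc : List (List Char × Int)) :
    genA_next kind ch acc
      = acc.flatMap (fun pc => (pvOptPairs ch kind).map (fun cd => (pc.1 ++ [cd.1], pc.2 + cd.2))) := by
  have step : (fun (nxt : List (List Char × Int)) (pc : List Char × Int) =>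
      if kind == "digit" then
        if PySem.Chars.isdigit ch then nxt ++ [(pc.1 ++ [ch], pc.2)]
        else if PySem.Chars.isalpha ch && pvDFL.contains ch then
          nxt ++ (pvDFL.getD ch []).map (fun d => (pc.1 ++ [d], pc.2 + 1))
        else nxt
      else
        if PySem.Chars.isalpha ch then nxt ++ [(pc.1 ++ [ch], pc.2)]
        else if PySem.Chars.isdigit ch && pvLFD.contains ch then
          nxt ++ (pvLFD.getD ch []).map (fun c => (pc.1 ++ [c], pc.2 + 1))
        else nxt)
      = fun nxt pc => nxt ++ (pvOptPairs ch kind).map (fun cd => (pc.1 ++ [cd.1], pc.2 + cd.2)) := by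
    funext nxt pc
    unfold pvOptPairs pvColumn
    split_ifs <;> simp [List.map_map, Function.comp]
  unfold genA_next
  rw [step, PySem.List.foldl_append_eq_flatMap]
  simp

-- A's accumulation over the remaining characters equals collect-then-enumerate
theorem genA_loop_eq (kind : String) (chars : List Char) :
    ∀ acc : List (List Char × Int), acc ≠ [] →
      genA_loop kind chars acc
        = (pvCollect kind chars).map (fun opts =>
            acc.flatMap (fun pc => (pvCombos opts).map (fun sc => (pc.1 ++ sc.1, pc.2 + sc.2)))) := by
  induction chars with
  | nil =>
    intro acc _
    simp [genA_loop, pvCollect, pvCombos]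
  | cons ch rest ih =>
    intro acc hacc
    rw [genA_loop]
    rw [genA_next_eq]
    by_cases h : pvOptPairs ch kind = []
    · simp [h, pvCollect]
    · have hne : acc.flatMap (fun pc => (pvOptPairs ch kind).map
          (fun cd => (pc.1 ++ [cd.1], pc.2 + cd.2))) ≠ [] := by
        intro hnil
        rw [List.flatMap_eq_nil_iff] at hnil
        obtain ⟨pc, hpc⟩ := List.exists_mem_of_ne_nil acc hacc
        have := hnil pc hpc
        simp [List.map_eq_nil_iff] at this
        exact h this
      rw [if_neg (by simpa [List.isEmpty_iff] using hne)]
      rw [ih _ hne]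
      have hcol : pvCollect kind (ch :: rest)
          = (pvCollect kind rest).map ((pvOptPairs ch kind) :: ·) := by
        rw [pvCollect]
        simp [List.isEmpty_iff, h]
      rw [hcol]
      cases hrest : pvCollect kind rest with
      | none => simp
      | some opts =>
        simp only [Option.map_some, Option.some.injEq]
        rw [List.flatMap_assoc]
        congr 1
        funext pc
        simp [pvCombos, List.flatMap_map, List.map_flatMap, List.map_map, Function.comp_def,
          Int.add_assoc]

-- the product has no duplicate strings when every column is duplicate-free
theorem pvProdR_nodup (cols : List (List Char)) (h : ∀ col ∈ cols, col.Nodup) :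
    (pvProdR cols).Nodup := by
  induction cols with
  | nil => simp [pvProdR]
  | cons col cols ih =>
    rw [pvProdR, List.nodup_flatMap]
    refine ⟨fun c _ => (ih (fun x hx => h x (by simp [hx]))).map (by intro a b hab; injection hab), ?_⟩
    have hcol : col.Nodup := h col (by simp)
    refine List.Pairwise.imp ?_ hcol
    intro a b hab s hs hs'
    simp only [List.mem_map] at hs hs'
    obtain ⟨x, _, rfl⟩ := hs
    obtain ⟨y, _, hy⟩ := hs'
    exact hab (by injection hy with h1 _; exact h1.symm)

-- the bridge: B's scan agrees with the proof-side collect, and the enumerated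
-- combinations are exactly B's product strings each carrying the one total cost
theorem pvScan_collect (kind : String) (chars : List Char) :
    (pvScan kind chars = none → pvCollect kind chars = none) ∧
    (∀ cols cost, pvScan kind chars = some (cols, cost) →
      ∃ opts, pvCollect kind chars = some opts ∧
        pvCombos opts = (pvProdR cols).map (fun s => (s, cost)) ∧
        (∀ col ∈ cols, col.Nodup)) := by
  induction chars with
  | nil =>
    constructor
    · intro h; simp [pvScan] at h
    · intro cols cost h
      simp only [pvScan, Option.some.injEq, Prod.mk.injEq] at h
      obtain ⟨rfl, rfl⟩ := h
      exact ⟨[], rfl, by simp [pvCombos, pvProdR], by simp⟩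
  | cons ch rest ih =>
    cases hc : pvColumn ch kind with
    | none =>
      constructor
      · intro _
        rw [pvCollect]
        simp [pvOptPairs, hc]
      · intro cols cost h
        rw [pvScan, hc] at h
        exact absurd h (by simp)
    | some cd =>
      obtain ⟨hne, hnd⟩ := pvColumn_props ch kind cd hc
      have hpairs : pvOptPairs ch kind = cd.1.map (fun c => (c, cd.2)) := by
        unfold pvOptPairs; rw [hc]
      have hpne : (pvOptPairs ch kind).isEmpty = false := by
        rw [hpairs]; simpa [List.isEmpty_iff, List.map_eq_nil_iff] using hne
      constructor
      · intro h
        rw [pvScan, hc] at h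
        cases hrest : pvScan kind rest with
        | none =>
          rw [pvCollect]
          simp only [hpne, Bool.false_eq_true, if_false]
          rw [(ih.1 hrest)]
          rfl
        | some cc => rw [hrest] at h; exact absurd h (by simp)
      · intro cols cost h
        rw [pvScan, hc] at h
        cases hrest : pvScan kind rest with
        | none => rw [hrest] at h; exact absurd h (by simp)
        | some cc =>
          rw [hrest] at h
          simp only [Option.map_some, Option.some.injEq, Prod.mk.injEq] at h
          obtain ⟨hcols, hcost⟩ := h
          obtain ⟨opts, hopts, hcomb, hnds⟩ := ih.2 cc.1 cc.2 (by rw [hrest])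
          refine ⟨pvOptPairs ch kind :: opts, ?_, ?_, ?_⟩
          · rw [pvCollect]
            simp only [hpne, Bool.false_eq_true, if_false, hopts]
            rfl
          · rw [pvCombos]
            simp only [hcomb, hpairs, ← hcols, ← hcost]
            rw [pvProdR]
            simp [List.flatMap_map, List.map_flatMap, List.map_map, Function.comp_def]
          · rw [← hcols]
            intro col hcol
            rcases List.mem_cons.mp hcol with rfl | hmem
            · exact hnd
            · exact hnds col hmem

-- A's dedup loop over distinct keys is the identity on the items list
theorem pvDedup_items_aux (l : List (List Char × Int)) :
    ∀ d : PySem.Dict (List Char) Int, (∀ p ∈ l, d.contains p.1 = false) →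
      (l.map Prod.fst).Nodup →
      (l.foldl (fun d sc => if !d.contains sc.1 || sc.2 < d.getD sc.1 0 then d.insert sc.1 sc.2 else d) d).items
        = d.items ++ l := by
  induction l with
  | nil => intro d _ _; simp
  | cons sc rest ih =>
    intro d hfresh hnd
    have hc : d.contains sc.1 = false := hfresh sc (by simp)
    simp only [List.foldl_cons, hc, Bool.not_false, Bool.true_or, if_true]
    rw [ih (d.insert sc.1 sc.2) ?_ (by simpa using hnd.of_cons)]
    · rw [PySem.Dict.items_insert_of_not_contains _ _ hc]
      simp
    · intro p hp
      rw [PySem.Dict.contains_insert]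
      have h1 : (p.1 == sc.1) = false := by
        simp only [List.map_cons, List.nodup_cons] at hnd
        have : p.1 ∈ rest.map Prod.fst := List.mem_map_of_mem hp
        simp only [beq_eq_false_iff_ne, ne_eq]
        intro he; exact hnd.1 (he ▸ this)
      rw [h1, hfresh p (by simp [hp])]
      rfl

theorem pvDedup_items (l : List (List Char × Int)) (h : (l.map Prod.fst).Nodup) :
    (pvDedup l).items = l := by
  unfold pvDedup
  rw [pvDedup_items_aux l PySem.Dict.empty (fun p _ => by simp) h]
  simp [PySem.Dict.empty]

-- A's output comprehension over keys equals the items, for a nodup-keyed dict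
theorem pvDict_out_eq (d : PySem.Dict (List Char) Int) (h : d.keys.Nodup) :
    d.keys.map (fun s => (String.ofList s, d.getD s 0))
      = d.items.map (fun sc => (String.ofList sc.1, sc.2)) := by
  simp only [PySem.Dict.keys, List.map_map]
  apply List.map_congr_left
  intro p hp
  have hv := PySem.Dict.getD_of_mem_items d (k := p.1) (v := p.2) (by simpa using hp) h 0
  simp [Function.comp, hv]

-- ===== VERDICT (by name: the statement is the Claim_ definition above) =====
theorem gen_conversions_py_spec : Claim_equal_gen_conversions_py := by
  intro raw kind _
  unfold Spec_gen_conversions_py gen_conversions_py gen_conversions_py_alt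
  rw [genA_loop_eq kind raw.toList [([], 0)] (by simp)]
  cases h : pvScan kind raw.toList with
  | none => rw [(pvScan_collect kind raw.toList).1 h]; rfl
  | some cc =>
    obtain ⟨opts, hopts, hcomb, hnds⟩ := (pvScan_collect kind raw.toList).2 cc.1 cc.2 (by rw [h])
    rw [hopts]
    simp only [Option.map_some]
    have hacc : ([(([] : List Char), (0 : Int))]).flatMap
        (fun pc => (pvCombos opts).map (fun sc => (pc.1 ++ sc.1, pc.2 + sc.2)))
        = pvCombos opts := by simp
    rw [hacc, hcomb]
    have hfst : (((pvProdR cc.1).map (fun s => (s, cc.2))).map Prod.fst) = pvProdR cc.1 := by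
      simp [List.map_map, Function.comp_def]
    have hnodup : (((pvProdR cc.1).map (fun s => (s, cc.2))).map Prod.fst).Nodup := by
      rw [hfst]; exact pvProdR_nodup cc.1 hnds
    have hitems := pvDedup_items _ hnodup
    have hkeysnd : (pvDedup ((pvProdR cc.1).map (fun s => (s, cc.2)))).keys.Nodup := by
      simp only [PySem.Dict.keys, hitems]
      exact hnodup
    rw [pvDict_out_eq _ hkeysnd, hitems, pvProduct_eq_prodR]
    simp
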